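-- pv_equiv track=rewrite | github.com/SurveyController/SurveyController | tencent/provider/runtime.py | _normalize_selected_indices
-- ===== SOURCE A (Python) =====
-- from typing import Any, Dict, List, Optional, Sequence
--
-- def _normalize_selected_indices(indices: Sequence[int], option_count: int) -> List[int]:
--     result: List[int] = []
--     seen = set()
--     for raw in indices:
--         try:
--             idx = int(raw)
--         except Exception:
--             continue
--         if idx < 0 or idx >= option_count or idx in seen:
--             continue
--         seen.add(idx)
--         result.append(idx)
--     return sorted(result)
-- ===== SOURCE B (Python) =====
-- def _normalize_selected_indices(indices, option_count):
--     # Sort first, then one scan that keeps in-range values and drops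
--     # adjacent duplicates (no set, no separate result-then-sort).
--     out = []
--     for idx in sorted(indices):
--         if 0 <= idx < option_count and (not out or idx != out[-1]):
--             out.append(idx)
--     return out
-- ===== Notes on version B (the rewrite author's own statement) =====
-- stated objective: alternative
-- what changed: B sorts the input first and does a single scan that filters out-of-range values and skips adjacent duplicates, instead of A's first-occurrence dedup via a seen-set followed by sorting the collected list.
import Mathlib
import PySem

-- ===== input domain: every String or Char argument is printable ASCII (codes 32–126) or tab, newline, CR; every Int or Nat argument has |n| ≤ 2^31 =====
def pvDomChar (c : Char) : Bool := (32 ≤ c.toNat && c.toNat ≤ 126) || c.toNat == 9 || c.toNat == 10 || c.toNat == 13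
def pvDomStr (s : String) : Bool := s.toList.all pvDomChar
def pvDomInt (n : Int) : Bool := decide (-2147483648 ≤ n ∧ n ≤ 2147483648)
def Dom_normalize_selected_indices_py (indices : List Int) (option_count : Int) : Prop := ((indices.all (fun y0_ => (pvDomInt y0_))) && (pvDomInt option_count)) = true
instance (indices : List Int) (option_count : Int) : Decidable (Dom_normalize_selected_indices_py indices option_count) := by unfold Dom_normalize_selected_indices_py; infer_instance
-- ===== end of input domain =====

-- B replaces A's seen-set dedup + final sort by sort-first then a single adjacent-dedup scan (alternative decomposition, same cost).


-- ===== PORT A =====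
-- loop over indices keeping (result, seen); int(raw) on an int is the identity, so the try/except never fires on List Int
def normalize_selected_indices_py (indices : List Int) (option_count : Int) : List Int :=
  let st : List Int × PySem.Set Int :=
    indices.foldl (fun acc raw =>
      let idx := raw
      if decide (idx < 0) || decide (option_count ≤ idx) || PySem.Set.contains acc.2 idx then acc
      else (acc.1 ++ [idx], PySem.Set.add acc.2 idx)) ([], PySem.Set.empty)
  PySem.List.sorted st.1 (fun x => x) false

-- ===== PORT B =====
-- sort first, then one scan keeping in-range values and dropping adjacent duplicates
def normalize_selected_indices_py_alt (indices : List Int) (option_count : Int) : List Int :=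
  (PySem.List.sorted indices (fun x => x) false).foldl
    (fun out idx =>
      if decide (0 ≤ idx) && decide (idx < option_count) && (out.isEmpty || decide (out.getLast? ≠ some idx)) then
        out ++ [idx]
      else out) []

-- ===== PRECONDITION & SPEC =====
def Spec_normalize_selected_indices_py (indices : List Int) (option_count : Int) (out : List Int) : Prop := out = normalize_selected_indices_py_alt indices option_count
instance (indices : List Int) (option_count : Int) (out : List Int) : Decidable (Spec_normalize_selected_indices_py indices option_count out) := by unfold Spec_normalize_selected_indices_py; infer_instance

-- ===== CLAIM (what is proved, stated in full; the proofs are below) =====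
def Claim_equal_normalize_selected_indices_py : Prop := ∀ (indices : List Int) (option_count : Int), Dom_normalize_selected_indices_py indices option_count → Spec_normalize_selected_indices_py indices option_count (normalize_selected_indices_py indices option_count)

-- ===== LEMMAS AND PROOFS =====

-- A's loop with seen mirrored as a list equals folding Set.add over the filtered input
lemma pvFoldA (oc : Int) (l : List Int) (s : List Int) :
    (l.foldl (fun (acc : List Int × PySem.Set Int) raw =>
      if decide (raw < 0) || decide (oc ≤ raw) || PySem.Set.contains acc.2 raw then acc
      else (acc.1 ++ [raw], PySem.Set.add acc.2 raw)) (s, s)).1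
    = (l.filter (fun x => decide (0 ≤ x) && decide (x < oc))).foldl PySem.Set.add s := by
  induction l generalizing s with
  | nil => rfl
  | cons x l ih =>
      rw [List.foldl_cons, List.filter_cons]
      by_cases h0 : x < 0
      · have hc : (decide (x < 0) || decide (oc ≤ x) || PySem.Set.contains s x) = true := by
          simp [h0]
        have hf : (decide (0 ≤ x) && decide (x < oc)) = false := by
          simp only [Bool.and_eq_false_iff, decide_eq_false_iff_not]; left; omega
        rw [hc, if_pos rfl, hf, if_neg Bool.false_ne_true]
        exact ih s
      · by_cases h1 : oc ≤ x
        · have hc : (decide (x < 0) || decide (oc ≤ x) || PySem.Set.contains s x) = true := by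
            simp [h1]
          have hf : (decide (0 ≤ x) && decide (x < oc)) = false := by
            simp only [Bool.and_eq_false_iff, decide_eq_false_iff_not]; right; omega
          rw [hc, if_pos rfl, hf, if_neg Bool.false_ne_true]
          exact ih s
        · have hf : (decide (0 ≤ x) && decide (x < oc)) = true := by
            simp only [Bool.and_eq_true, decide_eq_true_eq]; omega
          by_cases hm : x ∈ s
          · have hc : (decide (x < 0) || decide (oc ≤ x) || PySem.Set.contains s x) = true := by
              simp only [Bool.or_eq_true, decide_eq_true_eq, PySem.Set.contains_eq_listContains,
                List.contains_eq_mem]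
              exact Or.inr hm
            rw [hc, if_pos rfl, hf, if_pos rfl, List.foldl_cons, PySem.Set.add_of_mem hm]
            exact ih s
          · have hc : (decide (x < 0) || decide (oc ≤ x) || PySem.Set.contains s x) = false := by
              simp only [Bool.or_eq_false_iff, decide_eq_false_iff_not, PySem.Set.contains_eq_listContains,
                List.contains_eq_mem]
              exact ⟨⟨h0, h1⟩, hm⟩
            rw [hc, if_neg Bool.false_ne_true, hf, if_pos rfl, List.foldl_cons,
                PySem.Set.add_of_not_mem hm]
            exact ih (s ++ [x])

-- B's scan over a ≤-sorted suffix: invariant giving strict sortedness and membership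
lemma pvFoldB (oc : Int) (ys : List Int) (acc : List Int)
    (hys : ys.Pairwise (· ≤ ·)) (hacc : acc.Pairwise (· < ·))
    (hle : ∀ a ∈ acc, ∀ y ∈ ys, a ≤ y) :
    ((ys.foldl (fun out idx =>
        if decide (0 ≤ idx) && decide (idx < oc) && (out.isEmpty || decide (out.getLast? ≠ some idx)) then
          out ++ [idx] else out) acc).Pairwise (· < ·))
    ∧ (∀ x, x ∈ ys.foldl (fun out idx =>
        if decide (0 ≤ idx) && decide (idx < oc) && (out.isEmpty || decide (out.getLast? ≠ some idx)) then
          out ++ [idx] else out) acc ↔ x ∈ acc ∨ (x ∈ ys ∧ 0 ≤ x ∧ x < oc)) := by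
  induction ys generalizing acc with
  | nil => simp [hacc]
  | cons y ys ih =>
      have hys' : ys.Pairwise (· ≤ ·) := hys.tail
      have hyle : ∀ z ∈ ys, y ≤ z := fun z hz => List.rel_of_pairwise_cons hys hz
      rw [List.foldl_cons]
      by_cases hp : 0 ≤ y ∧ y < oc
      · by_cases hlast : acc.getLast? = some y
        · -- y is already the last element of acc: skipped
          have hne : acc ≠ [] := by
            intro h; rw [h] at hlast; simp at hlast
          have hmem : y ∈ acc := by
            obtain ⟨l', rfl⟩ := List.getLast?_eq_some_iff.mp hlast
            simp
          have hif : (decide (0 ≤ y) && decide (y < oc) && (acc.isEmpty || decide (acc.getLast? ≠ some y))) = false := by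
            simp [hlast, hne]
          rw [hif, if_neg Bool.false_ne_true]
          obtain ⟨hs, hm⟩ := ih acc hys' hacc (fun a ha z hz => hle a ha z (List.mem_cons_of_mem _ hz))
          refine ⟨hs, fun x => ?_⟩
          rw [hm]
          constructor
          · rintro (h | h)
            · exact Or.inl h
            · exact Or.inr ⟨List.mem_cons_of_mem _ h.1, h.2⟩
          · rintro (h | ⟨hx, hr⟩)
            · exact Or.inl h
            · rcases List.mem_cons.mp hx with rfl | hx
              · exact Or.inl hmem
              · exact Or.inr ⟨hx, hr⟩
        · -- y appended
          have hylt : ∀ a ∈ acc, a < y := by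
            intro a ha
            have hay : a ≤ y := hle a ha y (List.mem_cons_self)
            rcases lt_or_eq_of_le hay with h | h
            · exact h
            · exfalso
              subst h
              have hne : acc ≠ [] := fun hn => by rw [hn] at ha; simp at ha
              rcases List.eq_nil_or_concat acc with hn | ⟨L, z, rfl⟩
              · exact hne hn
              rw [List.concat_eq_append] at ha hacc hle hlast
              rcases List.mem_append.mp ha with hL | hL
              · have haz : a < z := (List.pairwise_append.mp hacc).2.2 a hL z (by simp)
                have hza : z ≤ a := hle z (by simp) a (List.mem_cons_self)
                omega
              · simp at hL
                exact hlast (by simp [hL])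
          have hif : (decide (0 ≤ y) && decide (y < oc) && (acc.isEmpty || decide (acc.getLast? ≠ some y))) = true := by
            simp [hp.1, hp.2, hlast]
          rw [hif, if_pos rfl]
          have hacc' : (acc ++ [y]).Pairwise (· < ·) := by
            rw [List.pairwise_append]
            refine ⟨hacc, List.pairwise_singleton _ _, fun a ha z hz => ?_⟩
            simp at hz; subst hz; exact hylt a ha
          have hle' : ∀ a ∈ acc ++ [y], ∀ z ∈ ys, a ≤ z := by
            intro a ha z hz
            rcases List.mem_append.mp ha with h | h
            · exact hle a h z (List.mem_cons_of_mem _ hz)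
            · simp at h; subst h; exact hyle z hz
          obtain ⟨hs, hm⟩ := ih (acc ++ [y]) hys' hacc' hle'
          refine ⟨hs, fun x => ?_⟩
          rw [hm]
          constructor
          · rintro (h | h)
            · rcases List.mem_append.mp h with h | h
              · exact Or.inl h
              · simp at h; subst h; exact Or.inr ⟨List.mem_cons_self, hp⟩
            · exact Or.inr ⟨List.mem_cons_of_mem _ h.1, h.2⟩
          · rintro (h | ⟨hx, hr⟩)
            · exact Or.inl (List.mem_append.mpr (Or.inl h))
            · rcases List.mem_cons.mp hx with rfl | hx
              · exact Or.inl (List.mem_append.mpr (Or.inr (by simp)))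
              · exact Or.inr ⟨hx, hr⟩
      · -- y filtered out
        have hif : (decide (0 ≤ y) && decide (y < oc) && (acc.isEmpty || decide (acc.getLast? ≠ some y))) = false := by
          rcases not_and_or.mp hp with h | h <;> simp [h]
        rw [hif, if_neg Bool.false_ne_true]
        obtain ⟨hs, hm⟩ := ih acc hys' hacc (fun a ha z hz => hle a ha z (List.mem_cons_of_mem _ hz))
        refine ⟨hs, fun x => ?_⟩
        rw [hm]
        constructor
        · rintro (h | h)
          · exact Or.inl h
          · exact Or.inr ⟨List.mem_cons_of_mem _ h.1, h.2⟩
        · rintro (h | ⟨hx, hr⟩)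
          · exact Or.inl h
          · rcases List.mem_cons.mp hx with rfl | hx
            · exact absurd hr hp
            · exact Or.inr ⟨hx, hr⟩

-- ===== VERDICT (by name: the statement is the Claim_ definition above) =====
theorem normalize_selected_indices_py_spec : Claim_equal_normalize_selected_indices_py := by
  intro indices oc _
  unfold Spec_normalize_selected_indices_py normalize_selected_indices_py normalize_selected_indices_py_alt
  simp only []
  -- A's collected list is set(filtered) in first-occurrence order
  have hA : (indices.foldl (fun (acc : List Int × PySem.Set Int) raw =>
      if decide (raw < 0) || decide (oc ≤ raw) || PySem.Set.contains acc.2 raw then acc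
      else (acc.1 ++ [raw], PySem.Set.add acc.2 raw)) ([], PySem.Set.empty)).1
      = PySem.Set.ofList (indices.filter (fun x => decide (0 ≤ x) && decide (x < oc))) := by
    rw [PySem.Set.ofList_eq_foldl]
    exact pvFoldA oc indices []
  rw [hA]
  have hsortedys : (PySem.List.sorted indices (fun x => x) false).Pairwise (· ≤ ·) := by
    have h := PySem.List.sorted_pairwise (xs := indices) (key := fun x => x)
    simpa using h
  obtain ⟨hBlt, hBmem⟩ := pvFoldB oc (PySem.List.sorted indices (fun x => x) false) []
    hsortedys List.Pairwise.nil (by simp)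
  have hBnodup : (((PySem.List.sorted indices (fun x => x) false).foldl
      (fun out idx =>
        if decide (0 ≤ idx) && decide (idx < oc) && (out.isEmpty || decide (out.getLast? ≠ some idx)) then
          out ++ [idx] else out) [])).Nodup := hBlt.imp (fun h => ne_of_lt h)
  have hperm : (((PySem.List.sorted indices (fun x => x) false).foldl
      (fun out idx =>
        if decide (0 ≤ idx) && decide (idx < oc) && (out.isEmpty || decide (out.getLast? ≠ some idx)) then
          out ++ [idx] else out) [])).Perm
      (PySem.Set.ofList (indices.filter (fun x => decide (0 ≤ x) && decide (x < oc)))) := by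
    rw [List.perm_ext_iff_of_nodup hBnodup (PySem.Set.nodup_ofList _)]
    intro x
    rw [hBmem x, PySem.Set.mem_ofList]
    simp [PySem.List.mem_sorted, List.mem_filter]
  exact PySem.List.sorted_eq_of_perm_of_pairwise_lt _ _ (fun x => x) hperm (by exact hBlt)
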